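-- pv_equiv track=rewrite | github.com/kage23/advent-of-code | src/2025/day06.py | find_column_gaps
-- ===== SOURCE A (Python) =====
-- def find_column_gaps(lines):
--     column_gaps = [-1]
--     row_spaces = list(map(get_spaces, lines))
--     for space in row_spaces[0]:
--         if all(space in r for r in row_spaces):
--             column_gaps.append(space)
--     column_gaps.append(len(lines[0]))
--     return column_gaps
--
-- def get_spaces(line):
--     spaces = []
--     for i in range(len(line)):
--         if line[i] == ' ':
--             spaces.append(i)
--     return spaces
-- ===== SOURCE B (Python) =====
-- def find_column_gaps(lines):
--     common = [i for i, c in enumerate(lines[0]) if c == ' ']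
--     for line in lines[1:]:
--         common = [i for i in common if i < len(line) and line[i] == ' ']
--     return [-1] + common + [len(lines[0])]
-- ===== Notes on version B (the rewrite author's own statement) =====
-- stated objective: faster
-- what changed: Instead of checking each space of row 0 against every row's list of space indices, B keeps a shrinking list of candidate columns and filters it once per row by direct indexing; intended as faster (probe measured ~1.5-3x at large sizes, not uniformly).
import Mathlib
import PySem

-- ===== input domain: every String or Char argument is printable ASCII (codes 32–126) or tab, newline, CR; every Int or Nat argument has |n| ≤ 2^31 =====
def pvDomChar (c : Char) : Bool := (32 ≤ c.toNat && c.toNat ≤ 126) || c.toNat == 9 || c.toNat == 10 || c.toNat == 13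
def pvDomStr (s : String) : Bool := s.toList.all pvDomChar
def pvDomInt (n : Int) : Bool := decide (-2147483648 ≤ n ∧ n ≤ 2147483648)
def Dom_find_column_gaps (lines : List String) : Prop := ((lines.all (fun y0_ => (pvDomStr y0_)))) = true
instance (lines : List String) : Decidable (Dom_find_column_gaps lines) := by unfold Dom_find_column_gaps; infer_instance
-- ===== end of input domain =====

-- B narrows a list of candidate columns by indexing into each row directly, instead of
-- scanning every row's space-index list for each space of row 0; intended as faster
-- (a timing run measured about 1.5x-3x at large sizes, not uniformly over inputs).

-- ===== PORT A =====
def getSpaces (line : String) : List Int :=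
  (PySem.List.pyRange 0 (PySem.Str.len line) 1).foldl
    (fun spaces i => if PySem.Str.pyGet? line i = some ' ' then spaces ++ [i] else spaces) []

def find_column_gaps (lines : List String) : List Int :=
  let row_spaces := lines.map getSpaces
  let column_gaps := (PySem.List.pyGetD row_spaces 0 []).foldl
    (fun acc space => if row_spaces.all (fun r => r.contains space) then acc ++ [space] else acc)
    [(-1 : Int)]
  column_gaps ++ [PySem.Str.len (PySem.List.pyGetD lines 0 "")]

-- ===== PORT B =====
def find_column_gaps_alt (lines : List String) : List Int :=
  match lines with
  | [] => []
  | l0 :: rest =>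
    let common0 := ((PySem.List.enumerate l0.toList 0).filter (fun p => p.2 == ' ')).map (·.1)
    let common := rest.foldl
      (fun c line => c.filter
        (fun i => decide (i < PySem.Str.len line) && (PySem.Str.pyGet? line i == some ' ')))
      common0
    [-1] ++ common ++ [PySem.Str.len l0]

-- ===== PRECONDITION & SPEC =====
-- A raises IndexError on the empty list (row_spaces[0]); Pre_ excludes exactly that input.
def Pre_find_column_gaps (lines : List String) : Prop := lines ≠ []
instance (lines : List String) : Decidable (Pre_find_column_gaps lines) := by unfold Pre_find_column_gaps; infer_instance
def pvWitness_find_column_gaps : List String := ["a b c", "d e f"]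

def Spec_find_column_gaps (lines : List String) (out : List Int) : Prop := out = find_column_gaps_alt lines
instance (lines : List String) (out : List Int) : Decidable (Spec_find_column_gaps lines out) := by unfold Spec_find_column_gaps; infer_instance

-- ===== CLAIM (what is proved, stated in full; the proofs are below) =====
def Claim_equal_find_column_gaps : Prop := ∀ (lines : List String), Dom_find_column_gaps lines → Pre_find_column_gaps lines → Spec_find_column_gaps lines (find_column_gaps lines)

-- ===== LEMMAS AND PROOFS =====

-- the space-index list in B's enumerate form
def eSpaces (line : String) : List Int :=
  ((PySem.List.enumerate line.toList 0).filter (fun p => p.2 == ' ')).map (·.1)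

theorem char_decide_beq (v : Char) : decide (v = ' ') = (v == ' ') := by
  rw [Bool.eq_iff_iff]; simp

theorem getSpaces_eq (line : String) : getSpaces line = eSpaces line := by
  unfold getSpaces eSpaces
  rw [PySem.List.foldl_append_ite_eq_filter]
  rw [PySem.List.enumerate_eq_map_pyRange _ 'x']
  simp only [List.filter_map, List.map_map, Function.comp_def, List.map_id']
  apply List.filter_congr
  intro i _
  simp only [PySem.List.pyGetD]
  cases h : PySem.List.pyGet? line.toList i <;> simp [h, char_decide_beq]

theorem mem_eSpaces (line : String) (x : Int) :
    x ∈ eSpaces line ↔ 0 ≤ x ∧ PySem.List.pyGet? line.toList x = some ' ' := by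
  unfold eSpaces
  simp only [List.mem_map, List.mem_filter, PySem.List.mem_enumerate_iff]
  constructor
  · rintro ⟨p, ⟨⟨k, hk, rfl⟩, hsp⟩, rfl⟩
    refine ⟨by positivity, ?_⟩
    rw [show ((0 : Int) + (k : Int)) = (k : Int) by ring, PySem.List.pyGet?_natCast,
      List.getElem?_eq_getElem (by simpa using hk)]
    simpa using hsp
  · rintro ⟨hx, hget⟩
    rw [PySem.List.pyGet?_of_nonneg _ hx] at hget
    obtain ⟨hlt, hc⟩ := List.getElem?_eq_some_iff.mp hget
    refine ⟨((x.toNat : Int), ' '), ⟨⟨x.toNat, hlt, by simp [hc]⟩, by simp⟩, by omega⟩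

theorem foldl_filter (rest : List String) (f : String → Int → Bool) (s : List Int) :
    rest.foldl (fun c line => c.filter (f line)) s
      = s.filter (fun x => rest.all (fun line => f line x)) := by
  induction rest generalizing s with
  | nil => simp
  | cons line rest ih =>
    rw [List.foldl_cons, ih, List.filter_filter]
    apply List.filter_congr
    intro x _
    simp [List.all_cons, Bool.and_comm]

-- ===== VERDICT (by name: the statement is the Claim_ definition above) =====
theorem find_column_gaps_spec : Claim_equal_find_column_gaps := by
  intro lines _ hpre
  unfold Spec_find_column_gaps
  match lines with
  | [] => exact absurd rfl hpre
  | l0 :: rest =>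
    unfold find_column_gaps find_column_gaps_alt
    dsimp only
    rw [foldl_filter]
    have hget : PySem.List.pyGetD ((l0 :: rest).map getSpaces) 0 ([] : List Int)
        = getSpaces l0 := by
      simp [PySem.List.pyGetD]
    have hlen : PySem.List.pyGetD (l0 :: rest) 0 "" = l0 := by
      simp [PySem.List.pyGetD]
    rw [hget, hlen]
    have key := PySem.List.foldl_append_if_eq_filter
      (p := fun space => ((l0 :: rest).map getSpaces).all fun r => r.contains space)
      (l := getSpaces l0) (acc := [(-1 : Int)])
    rw [key, getSpaces_eq]
    congr 2
    apply List.filter_congr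
    intro x hx
    obtain ⟨hx0, -⟩ := (mem_eSpaces l0 x).mp hx
    rw [Bool.eq_iff_iff]
    simp only [List.all_map, List.all_cons, List.all_eq_true, Bool.and_eq_true, decide_eq_true_eq,
      List.contains_iff_mem, getSpaces_eq, Function.comp_apply, beq_iff_eq, PySem.Str.pyGet?_eq,
      PySem.Str.len_eq]
    constructor
    · rintro ⟨-, h2⟩ line hline
      obtain ⟨-, hg⟩ := (mem_eSpaces line x).mp (h2 line hline)
      have : x < (line.toList.length : Int) := by
        rw [PySem.List.pyGet?_of_nonneg _ hx0] at hg
        have := (List.getElem?_eq_some_iff.mp hg).1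
        omega
      exact ⟨by simpa using this, hg⟩
    · intro h
      refine ⟨hx, fun line hline => (mem_eSpaces line x).mpr ⟨hx0, (h line hline).2⟩⟩
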